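-- pv_equiv track=rewrite | github.com/johnsaigle/hacker_rank_solutions | bus_solution.py | stuff_passengers
-- ===== SOURCE A (Python) =====
-- from collections import deque
--
-- def stuff_passengers(size, groups):
--     tmp_groups = deque(groups) # convert our list of ints into a queue so we can use pop
--     current_capacity = 0
--     if len(tmp_groups) == 0:
--         # we have no passengers remaining -- success!
--         return True
--     while True:
--         if len(tmp_groups) > 0:
--             try:
--                 current_capacity += tmp_groups.popleft()
--             except IndexError:
--                 # if the bus is not full, and we are out of groups, this is a bad fit
--                 return False
--             if current_capacity < size:
--                 continue
--             elif current_capacity == size: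
--                 # we have a perfect fit of groups in the current iteration
--                 return stuff_passengers(size, tmp_groups)
--             else:
--                 # if the passengers in our bus configuration exceed its size, return false
--                 return False
--         else:
--             if current_capacity != size:
--                 return False
-- ===== SOURCE B (Python) =====
-- def stuff_passengers(size, groups):
--     # single linear pass: running chunk sum, reset on exact hit, fail on overshoot;
--     # succeed iff we end exactly on a chunk boundary (or there were no groups)
--     acc = 0
--     boundary = True
--     for g in groups:
--         acc += g
--         boundary = (acc == size)
--         if boundary:
--             acc = 0
--         elif acc > size:
--             return False
--     return boundary
-- ===== Notes on version B (the rewrite author's own statement) =====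
-- stated objective: simpler
-- what changed: Replaces the recursive deque-copying consumer (fresh deque built per completed chunk) with a single iterative pass keeping a running chunk sum and a boundary flag.
import Mathlib
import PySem

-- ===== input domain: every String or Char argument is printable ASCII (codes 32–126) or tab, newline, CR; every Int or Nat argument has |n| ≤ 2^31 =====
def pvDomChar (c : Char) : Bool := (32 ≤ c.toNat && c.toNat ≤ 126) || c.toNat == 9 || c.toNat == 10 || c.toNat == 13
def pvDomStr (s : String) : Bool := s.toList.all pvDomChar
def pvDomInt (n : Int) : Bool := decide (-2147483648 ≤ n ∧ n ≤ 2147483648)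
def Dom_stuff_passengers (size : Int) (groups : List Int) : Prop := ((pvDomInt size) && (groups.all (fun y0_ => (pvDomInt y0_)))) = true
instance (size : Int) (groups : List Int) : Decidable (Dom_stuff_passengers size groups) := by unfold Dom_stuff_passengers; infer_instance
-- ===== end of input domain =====

-- B replaces A's recursive deque-copying chunk consumer with one simpler linear pass
-- (running sum, reset on exact hit, fail on overshoot, boundary flag).


-- ===== PORT A =====
-- A's `while True` over the deque is the helper pvLoopA; the `current_capacity == size` branch
-- re-enters stuff_passengers on the remaining groups, exactly as the Python recursion does.
mutual
def stuff_passengers (size : Int) (groups : List Int) : Bool :=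
  if groups.length = 0 then true
  else pvLoopA size groups 0
termination_by (groups.length, 1)

def pvLoopA (size : Int) (tmp : List Int) (cap : Int) : Bool :=
  match tmp with
  | [] =>
      -- Python: `if current_capacity != size: return False`; the `==` case is unreachable
      -- from any call of stuff_passengers (cap < size on every entry to this branch)
      if cap ≠ size then false else false
  | g :: rest =>
      let cap' := cap + g
      if cap' < size then pvLoopA size rest cap'
      else if cap' = size then stuff_passengers size rest
      else false
termination_by (tmp.length, 0)
end

-- ===== PORT B =====
-- Source B's for-loop with early return, as structural recursion over the list
def pvLoopB (size : Int) : List Int → Int → Bool → Bool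
  | [], _, boundary => boundary
  | g :: rest, acc, _ =>
      let acc' := acc + g
      if acc' = size then pvLoopB size rest 0 true
      else if acc' > size then false
      else pvLoopB size rest acc' false

def stuff_passengers_alt (size : Int) (groups : List Int) : Bool :=
  pvLoopB size groups 0 true

-- ===== PRECONDITION & SPEC =====
def Spec_stuff_passengers (size : Int) (groups : List Int) (out : Bool) : Prop := out = stuff_passengers_alt size groups
instance (size : Int) (groups : List Int) (out : Bool) : Decidable (Spec_stuff_passengers size groups out) := by unfold Spec_stuff_passengers; infer_instance

-- ===== CLAIM (what is proved, stated in full; the proofs are below) =====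
def Claim_equal_stuff_passengers : Prop := ∀ (size : Int) (groups : List Int), Dom_stuff_passengers size groups → Spec_stuff_passengers size groups (stuff_passengers size groups)

-- ===== LEMMAS AND PROOFS =====

-- the loops agree (flag false) and the entry points agree, by one induction on the list
theorem pv_agree (size : Int) (tmp : List Int) :
    (∀ cap, pvLoopA size tmp cap = pvLoopB size tmp cap false) ∧
    stuff_passengers size tmp = pvLoopB size tmp 0 true := by
  induction tmp with
  | nil =>
      constructor
      · intro cap; simp [pvLoopA, pvLoopB]
      · simp [stuff_passengers, pvLoopB]
  | cons g rest ih =>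
      have hloop : ∀ cap, pvLoopA size (g :: rest) cap = pvLoopB size (g :: rest) cap false := by
        intro cap
        simp only [pvLoopA, pvLoopB]
        by_cases h1 : cap + g < size
        · have h2 : ¬ (cap + g = size) := by omega
          have h3 : ¬ (cap + g > size) := by omega
          simp [h1, h2, h3, ih.1]
        · by_cases h2 : cap + g = size
          · simp [h2, ih.2]
          · have h3 : cap + g > size := by omega
            simp [h1, h2, h3]
      refine ⟨hloop, ?_⟩
      have : stuff_passengers size (g :: rest) = pvLoopA size (g :: rest) 0 := by
        simp [stuff_passengers]
      rw [this, hloop 0]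
      -- the cons step of pvLoopB ignores the incoming boundary flag
      simp [pvLoopB]

-- ===== VERDICT (by name: the statement is the Claim_ definition above) =====
theorem stuff_passengers_spec : Claim_equal_stuff_passengers := by
  intro size groups _
  unfold Spec_stuff_passengers stuff_passengers_alt
  exact (pv_agree size groups).2
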